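-- pv_equiv track=rewrite | github.com/DusunHwang/Data_LG | backend/app/graph/subgraphs/modeling.py | _infer_target_from_message
-- ===== SOURCE A (Python) =====
-- def _infer_target_from_message(message: str, columns: list[str]) -> str | None:
--     lowered = message.lower()
--     compact = "".join(lowered.split())
--     for col in sorted(columns, key=len, reverse=True):
--         col_lower = str(col).lower()
--         if col_lower in lowered or "".join(col_lower.split()) in compact:
--             return str(col)
--     return None
-- ===== SOURCE B (Python) =====
-- def _matches(col_lower: str, lowered: str, compact: str) -> bool:
--     return col_lower in lowered or "".join(col_lower.split()) in compact
--
--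
-- def _infer_target_from_message(message: str, columns: list[str]) -> str | None:
--     # Two-stage pipeline instead of sort-then-scan: collect every matching column,
--     # then take the longest one.  Python's max(key=len) returns the FIRST element
--     # of maximal length, which is exactly the column A's stable reverse sort picks.
--     lowered = message.lower()
--     compact = "".join(lowered.split())
--     hits = [str(col) for col in columns if _matches(str(col).lower(), lowered, compact)]
--     return max(hits, key=len) if hits else None
-- ===== Notes on version B (the rewrite author's own statement) =====
-- stated objective: simpler
-- what changed: Replaces the sort-by-length-descending-then-return-first-match loop with a filter of the matching columns followed by max(hits, key=len) (first maximal element, hence the same tie-breaking as A's stable reverse sort), removing the O(n log n) sort.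
import Mathlib
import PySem

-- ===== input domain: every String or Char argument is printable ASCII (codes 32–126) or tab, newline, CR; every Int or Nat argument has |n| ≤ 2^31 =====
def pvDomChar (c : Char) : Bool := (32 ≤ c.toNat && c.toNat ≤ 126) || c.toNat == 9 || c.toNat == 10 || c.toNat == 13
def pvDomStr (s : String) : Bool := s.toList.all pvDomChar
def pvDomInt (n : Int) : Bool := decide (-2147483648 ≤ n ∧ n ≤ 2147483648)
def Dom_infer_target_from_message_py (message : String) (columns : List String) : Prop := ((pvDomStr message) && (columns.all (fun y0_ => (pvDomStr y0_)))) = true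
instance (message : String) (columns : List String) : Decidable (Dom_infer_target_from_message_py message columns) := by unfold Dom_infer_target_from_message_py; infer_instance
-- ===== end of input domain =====

-- B replaces A's sort-then-return-first-match with a filter of the matching columns
-- followed by taking the first longest hit (max by length), same result, no sort.

-- ===== PORT A =====
def infer_target_from_message_py (message : String) (columns : List String) : Option String :=
  let lowered := PySem.Str.lower message
  let compact := PySem.Str.join "" (PySem.Str.split₀ lowered)
  (PySem.List.sorted columns (fun c => PySem.Str.len c) true).find? (fun col =>
    let colLower := PySem.Str.lower col
    PySem.Str.isIn colLower lowered ||
      PySem.Str.isIn (PySem.Str.join "" (PySem.Str.split₀ colLower)) compact)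

-- ===== PORT B =====
def pvMatches (colLower lowered compact : String) : Bool :=
  PySem.Str.isIn colLower lowered ||
    PySem.Str.isIn (PySem.Str.join "" (PySem.Str.split₀ colLower)) compact

def infer_target_from_message_py_alt (message : String) (columns : List String) : Option String :=
  let lowered := PySem.Str.lower message
  let compact := PySem.Str.join "" (PySem.Str.split₀ lowered)
  let hits := columns.filter (fun col => pvMatches (PySem.Str.lower col) lowered compact)
  if hits.isEmpty then none else PySem.List.max? hits (fun c => PySem.Str.len c)

-- ===== PRECONDITION & SPEC =====
def Spec_infer_target_from_message_py (message : String) (columns : List String) (out : Option String) : Prop := out = infer_target_from_message_py_alt message columns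
instance (message : String) (columns : List String) (out : Option String) : Decidable (Spec_infer_target_from_message_py message columns out) := by unfold Spec_infer_target_from_message_py; infer_instance

-- ===== CLAIM =====
def Claim_equal_infer_target_from_message_py : Prop := ∀ (message : String) (columns : List String), Dom_infer_target_from_message_py message columns → Spec_infer_target_from_message_py message columns (infer_target_from_message_py message columns)

-- ===== LEMMAS AND PROOFS =====

-- find? ignores an inserted non-matching element
theorem find?_insertBy_neg {α : Type} (bef : α → α → Bool) (p : α → Bool) (x : α)
    (ys : List α) (hx : p x = false) :
    (PySem.List.insertBy bef x ys).find? p = ys.find? p := by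
  induction ys with
  | nil => simp [PySem.List.insertBy, List.find?, hx]
  | cons y ys ih =>
    by_cases hb : bef x y = true
    · simp [PySem.List.insertBy, hb, List.find?, hx]
    · by_cases hp : p y = true
      · simp [PySem.List.insertBy, hb, List.find?, hp]
      · simp only [PySem.List.insertBy, hb, if_false, Bool.false_eq_true]
        simp [List.find?, hp, ih]

-- inserting a matching element into a key-descending list: the first match becomes
-- x exactly when x's key beats the previous first match's key
theorem find?_insertBy_pos {α : Type} (key : α → Int) (p : α → Bool) (x : α)
    (ys : List α) (hx : p x = true)
    (hdesc : ys.Pairwise (fun a b => key b ≤ key a)) :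
    (PySem.List.insertBy (fun a b => decide (key b < key a)) x ys).find? p =
      some (match ys.find? p with
            | none => x
            | some m => if key m < key x then x else m) := by
  induction ys with
  | nil => simp [PySem.List.insertBy, List.find?, hx]
  | cons y ys ih =>
    rcases List.pairwise_cons.mp hdesc with ⟨hy, hys⟩
    by_cases hk : key y < key x
    · have hb : (decide (key y < key x)) = true := by simpa using hk
      simp only [PySem.List.insertBy, hb, if_true]
      rw [List.find?_cons_of_pos hx]
      cases hf : (y :: ys).find? p with
      | none => simp
      | some m =>
        have hm : m ∈ y :: ys := List.mem_of_find?_eq_some hf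
        have hmk : key m < key x := by
          rcases List.mem_cons.mp hm with h | h
          · subst h; omega
          · have := hy m h; omega
        simp [hmk]
    · have hb : (decide (key y < key x)) = false := by simpa using hk
      simp only [PySem.List.insertBy, hb, Bool.false_eq_true, if_false]
      by_cases hp : p y = true
      · rw [List.find?_cons_of_pos hp, List.find?_cons_of_pos hp]
        have : ¬ key y < key x := hk
        simp [this]
      · have hp' : p y = false := by simpa using hp
        rw [List.find?_cons_of_neg (by simp [hp']), List.find?_cons_of_neg (by simp [hp'])]
        exact ih hys

-- max? over a list with one element appended: compare the new element with the old max
theorem max?_append_singleton {α : Type} (key : α → Int) (ys : List α) (x : α) :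
    PySem.List.max? (ys ++ [x]) key =
      some (match PySem.List.max? ys key with
            | none => x
            | some m => if key m < key x then x else m) := by
  cases h : PySem.List.max? ys key with
  | none =>
    have hnil : ys = [] := (PySem.List.max?_eq_none_iff ys key).mp h
    subst hnil
    simp [PySem.List.max?]
  | some m =>
    unfold PySem.List.max? at h ⊢
    rw [List.foldl_append, h, List.foldl_cons, List.foldl_nil]
    by_cases hk : key m < key x <;> simp [hk]

-- the first match of the key-descending sorted list is the first longest match
theorem find?_sorted_eq_max?_filter {α : Type} (p : α → Bool) (key : α → Int)
    (cs : List α) :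
    (PySem.List.sorted cs key true).find? p = PySem.List.max? (cs.filter p) key := by
  induction cs using List.reverseRecOn with
  | nil => simp [PySem.List.sorted, PySem.List.max?]
  | append_singleton cs x ih =>
    have hsorted : PySem.List.sorted (cs ++ [x]) key true =
        PySem.List.insertBy (fun a b => decide (key b < key a)) x
          (PySem.List.sorted cs key true) := by
      rw [PySem.List.sorted_rev_eq_foldl_insertBy, PySem.List.sorted_rev_eq_foldl_insertBy,
        List.foldl_append, List.foldl_cons, List.foldl_nil]
    rw [hsorted, List.filter_append]
    by_cases hp : p x = true
    · rw [find?_insertBy_pos key p x _ hp (PySem.List.sorted_pairwise_rev cs key), ih]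
      simp only [List.filter_cons, hp, if_true, List.filter_nil]
      rw [max?_append_singleton]
    · have hp' : p x = false := by simpa using hp
      rw [find?_insertBy_neg _ p x _ hp', ih]
      simp [hp']

-- max? is none exactly on the empty list, so B's emptiness guard is redundant
theorem max?_guard {α : Type} (key : α → Int) (hs : List α) :
    (if hs.isEmpty then none else PySem.List.max? hs key) = PySem.List.max? hs key := by
  cases hs with
  | nil => simp [PySem.List.max?]
  | cons h t => simp

-- ===== VERDICT =====
theorem infer_target_from_message_py_spec : Claim_equal_infer_target_from_message_py := by
  intro message columns _
  unfold Spec_infer_target_from_message_py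
  unfold infer_target_from_message_py infer_target_from_message_py_alt
  rw [max?_guard]
  have := find?_sorted_eq_max?_filter
    (fun col => pvMatches (PySem.Str.lower col) (PySem.Str.lower message)
      (PySem.Str.join "" (PySem.Str.split₀ (PySem.Str.lower message))))
    (fun c => PySem.Str.len c) columns
  simpa [pvMatches] using this
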